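-- pv_equiv track=rewrite | github.com/phate/jive | scripts/arrayliterals.py | find_stmt_start
-- ===== SOURCE A (Python) =====
-- def scan_stmt_starts(text):
-- 	starts = []
-- 	next_line_stmt = False
-- 	beginning_decl = False
-- 	nested_decls = set()
-- 	depth = 0
-- 	for n in range(len(text)):
-- 		c = text[n]
-- 		if c == '{':
-- 			if beginning_decl:
-- 				nested_decls.add(depth)
-- 			depth += 1
-- 		elif c == '}':
-- 			depth -= 1
-- 			if depth in nested_decls:
-- 				nested_decls.remove(depth)
-- 		elif c == '=':
-- 			beginning_decl = True
-- 		if c not in '= \t\n':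
-- 			beginning_decl = False
--
-- 		if c == ';' or c == '{' or c == '}':
-- 			next_line_stmt = not bool(nested_decls)
-- 		elif c == '\n' and next_line_stmt:
-- 			starts.append((n + 1, get_indent(text, n + 1)))
-- 			next_line_stmt = False
-- 		else:
-- 			next_line_stmt = False
-- 	assert depth == 0
-- 	return starts
--
-- def get_indent(text, pos):
-- 	indent = ''
-- 	while pos < len(text) and text[pos] == '\t':
-- 		indent += text[pos]
-- 		pos += 1
-- 	return indent
--
-- def find_stmt_start(text, pos):
-- 	last_start, last_indent = 0, ''
-- 	for start, indent in scan_stmt_starts(text):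
-- 		if start > pos:
-- 			return last_start, last_indent
-- 		last_start = start
-- 		last_indent = indent
-- 	return last_start, last_indent
-- ===== SOURCE B (Python) =====
-- def find_stmt_start(text, pos):
--     # single fused pass: no intermediate list of all statement starts
--     last_start, last_indent = 0, ''
--     next_line_stmt = False
--     beginning_decl = False
--     nested_decls = set()
--     depth = 0
--     for n, c in enumerate(text):
--         if c == '{':
--             if beginning_decl:
--                 nested_decls.add(depth)
--             depth += 1
--         elif c == '}':
--             depth -= 1
--             nested_decls.discard(depth)
--         elif c == '=':
--             beginning_decl = True
--         if c not in '= \t\n':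
--             beginning_decl = False
--         if c == ';' or c == '{' or c == '}':
--             next_line_stmt = not nested_decls
--         elif c == '\n' and next_line_stmt:
--             if n + 1 <= pos:
--                 j = n + 1
--                 while j < len(text) and text[j] == '\t':
--                     j += 1
--                 last_start, last_indent = n + 1, text[n + 1:j]
--             next_line_stmt = False
--         else:
--             next_line_stmt = False
--     assert depth == 0
--     return last_start, last_indent
-- ===== Notes on version B (the rewrite author's own statement) =====
-- stated objective: simpler
-- what changed: B fuses the three functions into one streaming pass that keeps only the best (start, indent) pair seen so far, instead of building the full list of statement starts and then rescanning it; indent is computed only for starts that can still be the answer.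
import Mathlib
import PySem

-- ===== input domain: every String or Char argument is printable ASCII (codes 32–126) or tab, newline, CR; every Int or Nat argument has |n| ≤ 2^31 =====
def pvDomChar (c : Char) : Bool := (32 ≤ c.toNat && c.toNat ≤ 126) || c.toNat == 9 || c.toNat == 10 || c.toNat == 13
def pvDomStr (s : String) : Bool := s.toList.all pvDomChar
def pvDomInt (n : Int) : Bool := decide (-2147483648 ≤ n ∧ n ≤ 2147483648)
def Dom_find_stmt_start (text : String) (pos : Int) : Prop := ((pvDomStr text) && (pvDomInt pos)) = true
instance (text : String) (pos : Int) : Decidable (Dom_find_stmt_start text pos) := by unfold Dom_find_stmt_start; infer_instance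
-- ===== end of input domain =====

-- B fuses A's build-list-then-rescan into one streaming pass keeping only the best (start, indent) pair; same return value (neither version mutates its arguments).

-- ===== PORT A =====
-- get_indent's while loop: accumulate the leading tabs of text[pos:] (char list accumulator, wrapped by String.ofList at the end)
def pvGetIndentGo : List Char → List Char → List Char
  | [], ind => ind
  | c :: rest, ind => if c = '\t' then pvGetIndentGo rest (ind ++ [c]) else ind

def get_indent (text : String) (pos : Nat) : String :=
  String.ofList (pvGetIndentGo (text.toList.drop pos) [])

-- the for-loop of scan_stmt_starts, one recursive call per character (n is the loop index)
def pvScanGo (text : String) : List Char → Nat → List (Int × String) → Bool → Bool → PySem.Set Int → Int → List (Int × String)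
  | [], _, starts, _, _, _, _ => starts
  | c :: rest, n, starts, nl, bd, nd, depth =>
    let p :=
      if c = '{' then ((if bd then PySem.Set.add nd depth else nd), depth + 1)
      else if c = '}' then
        let d := depth - 1
        ((if PySem.Set.contains nd d then ((PySem.Set.remove? nd d).getD nd) else nd), d)
      else (nd, depth)
    let bd1 := if c = '=' then true else bd
    let bd2 := if c = '=' ∨ c = ' ' ∨ c = '\t' ∨ c = '\n' then bd1 else false
    if c = ';' ∨ c = '{' ∨ c = '}' then
      pvScanGo text rest (n+1) starts p.1.isEmpty bd2 p.1 p.2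
    else if c = '\n' ∧ nl = true then
      pvScanGo text rest (n+1) (starts ++ [(((n:Int)+1), get_indent text (n+1))]) false bd2 p.1 p.2
    else
      pvScanGo text rest (n+1) starts false bd2 p.1 p.2

def scan_stmt_starts (text : String) : List (Int × String) :=
  pvScanGo text text.toList 0 [] false false PySem.Set.empty 0

-- the for-loop of find_stmt_start, with its early return on start > pos
def pvPick : List (Int × String) → Int → Int × String → Int × String
  | [], _, acc => acc
  | (s, ind) :: rest, pos, acc => if s > pos then acc else pvPick rest pos (s, ind)

def find_stmt_start (text : String) (pos : Int) : Int × String :=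
  pvPick (scan_stmt_starts text) pos (0, "")

-- ===== PORT B =====
-- B's indent while-loop: advance j past the tabs, then slice text[n+1:j]
def pvTabEnd : List Char → Nat → Nat
  | [], j => j
  | c :: rest, j => if c = '\t' then pvTabEnd rest (j+1) else j

-- B's single fused loop: the accumulator is the best (last_start, last_indent) so far
def pvBGo (text : String) (pos : Int) : List Char → Nat → (Int × String) → Bool → Bool → PySem.Set Int → Int → Int × String
  | [], _, last, _, _, _, _ => last
  | c :: rest, n, last, nl, bd, nd, depth =>
    let p :=
      if c = '{' then ((if bd then PySem.Set.add nd depth else nd), depth + 1)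
      else if c = '}' then (PySem.Set.discard nd (depth - 1), depth - 1)
      else (nd, depth)
    let bd2 := if c = '=' ∨ c = ' ' ∨ c = '\t' ∨ c = '\n' then (if c = '=' then true else bd) else false
    if c = ';' ∨ c = '{' ∨ c = '}' then
      pvBGo text pos rest (n+1) last p.1.isEmpty bd2 p.1 p.2
    else if c = '\n' ∧ nl = true then
      pvBGo text pos rest (n+1)
        (if ((n:Int)+1) ≤ pos then
          (((n:Int)+1), String.ofList (PySem.List.slice text.toList (some ((n:Int)+1)) (some ((pvTabEnd (text.toList.drop (n+1)) (n+1) : Nat) : Int))))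
         else last)
        false bd2 p.1 p.2
    else
      pvBGo text pos rest (n+1) last false bd2 p.1 p.2

def find_stmt_start_alt (text : String) (pos : Int) : Int × String :=
  pvBGo text pos text.toList 0 (0, "") false false PySem.Set.empty 0

-- ===== PRECONDITION & SPEC =====
-- A (and B) end with 'assert depth == 0': exactly the texts with as many '{' as '}' return normally.
def Pre_find_stmt_start (text : String) (pos : Int) : Prop :=
  text.toList.count '{' = text.toList.count '}'
instance (text : String) (pos : Int) : Decidable (Pre_find_stmt_start text pos) := by unfold Pre_find_stmt_start; infer_instance

def pvWitness_find_stmt_start : String × Int := ("a = {1};\n\tb;\nc;\n", 12)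

def Spec_find_stmt_start (text : String) (pos : Int) (out : Int × String) : Prop := out = find_stmt_start_alt text pos
instance (text : String) (pos : Int) (out : Int × String) : Decidable (Spec_find_stmt_start text pos out) := by unfold Spec_find_stmt_start; infer_instance

-- ===== CLAIM (what is proved, stated in full; the proofs are below) =====
def Claim_equal_find_stmt_start : Prop := ∀ (text : String) (pos : Int), Dom_find_stmt_start text pos → Pre_find_stmt_start text pos → Spec_find_stmt_start text pos (find_stmt_start text pos)

-- ===== LEMMAS AND PROOFS =====

-- the fold step that keeps the last start ≤ pos
def pvUpd (pos : Int) (z e : Int × String) : Int × String := if e.1 ≤ pos then e else z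

theorem pvDiscard_eq (nd : PySem.Set Int) (d : Int) :
    PySem.Set.discard nd d = if PySem.Set.contains nd d then ((PySem.Set.remove? nd d).getD nd) else nd := by
  by_cases h : PySem.Set.contains nd d = true
  · rw [if_pos h, PySem.Set.remove?_of_mem ((PySem.Set.contains_iff nd d).mp h)]
    rfl
  · rw [if_neg h]
    have hm : d ∉ nd := fun hmem => h ((PySem.Set.contains_iff nd d).mpr hmem)
    simp only [PySem.Set.discard]
    exact List.filter_eq_self.mpr (fun y hy => by simp; rintro rfl; exact hm hy)

theorem pvGetIndentGo_eq : ∀ (l acc : List Char),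
    pvGetIndentGo l acc = acc ++ l.takeWhile (fun c => c = '\t') := by
  intro l
  induction l with
  | nil => intro acc; simp [pvGetIndentGo]
  | cons c rest ih =>
    intro acc
    by_cases h : c = '\t'
    · simp [pvGetIndentGo, h, ih]
    · simp [pvGetIndentGo, h]

theorem pvTabEnd_eq : ∀ (l : List Char) (j : Nat),
    pvTabEnd l j = j + (l.takeWhile (fun c => c = '\t')).length := by
  intro l
  induction l with
  | nil => intro j; simp [pvTabEnd]
  | cons c rest ih =>
    intro j
    by_cases h : c = '\t'
    · simp [pvTabEnd, h, ih]; omega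
    · simp [pvTabEnd, h]

theorem pvIndent_eq (text : String) (n : Nat) :
    String.ofList (PySem.List.slice text.toList (some ((n:Int)+1)) (some ((pvTabEnd (text.toList.drop (n+1)) (n+1) : Nat) : Int)))
      = get_indent text (n+1) := by
  unfold get_indent
  rw [pvGetIndentGo_eq, pvTabEnd_eq]
  have hc : ((n:Int) + 1) = ((n + 1 : Nat) : Int) := by push_cast; ring
  rw [hc, PySem.List.slice_natCast, Nat.add_sub_cancel_left]
  congr 1
  exact (List.prefix_iff_eq_take.mp (List.takeWhile_prefix _)).symm

-- B's loop computes the ≤-fold of A's starts list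
theorem pvBGo_eq_foldl (text : String) (pos : Int) :
    ∀ (cs : List Char) (n : Nat) (starts : List (Int × String)) (nl bd : Bool) (nd : PySem.Set Int) (depth : Int) (z : Int × String),
      pvBGo text pos cs n (List.foldl (pvUpd pos) z starts) nl bd nd depth
        = List.foldl (pvUpd pos) z (pvScanGo text cs n starts nl bd nd depth) := by
  intro cs
  induction cs with
  | nil => intro n starts nl bd nd depth z; simp [pvBGo, pvScanGo]
  | cons c rest ih =>
    intro n starts nl bd nd depth z
    simp only [pvBGo, pvScanGo]
    rw [pvDiscard_eq nd (depth - 1)]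
    by_cases h1 : c = ';' ∨ c = '{' ∨ c = '}'
    · simp only [if_pos h1]; exact ih ..
    · simp only [if_neg h1]
      by_cases h2 : c = '\n' ∧ nl = true
      · simp only [if_pos h2]
        rw [pvIndent_eq]
        have hfold : (if ((n:Int)+1) ≤ pos then (((n:Int)+1), get_indent text (n+1)) else List.foldl (pvUpd pos) z starts)
            = List.foldl (pvUpd pos) z (starts ++ [(((n:Int)+1), get_indent text (n+1))]) := by
          rw [List.foldl_append]; rfl
        rw [hfold]
        exact ih ..
      · simp only [if_neg h2]; exact ih ..

theorem pvFoldl_id (pos : Int) :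
    ∀ (l : List (Int × String)) (z : Int × String), (∀ e ∈ l, pos < e.1) → List.foldl (pvUpd pos) z l = z := by
  intro l
  induction l with
  | nil => intro z _; rfl
  | cons e rest ih =>
    intro z h
    have he := h e (by simp)
    simp only [List.foldl_cons, pvUpd, if_neg (by omega : ¬ e.1 ≤ pos)]
    exact ih z (fun x hx => h x (by simp [hx]))

-- on a strictly increasing starts list, A's early-return scan equals the ≤-fold
theorem pvPick_eq_foldl (pos : Int) :
    ∀ (l : List (Int × String)) (z : Int × String), l.Pairwise (fun a b => a.1 < b.1) →
      pvPick l pos z = List.foldl (pvUpd pos) z l := by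
  intro l
  induction l with
  | nil => intro z _; rfl
  | cons e rest ih =>
    intro z hp
    obtain ⟨hhead, htail⟩ := List.pairwise_cons.mp hp
    obtain ⟨s, i⟩ := e
    by_cases h : s > pos
    · simp only [pvPick, if_pos h, List.foldl_cons, pvUpd, if_neg (by omega : ¬ s ≤ pos)]
      exact (pvFoldl_id pos rest z (fun x hx => lt_trans h (hhead x hx))).symm
    · simp only [pvPick, if_neg h, List.foldl_cons, pvUpd, if_pos (by omega : s ≤ pos)]
      exact ih (s, i) htail

-- scan_stmt_starts appends strictly increasing positions
theorem pvScanGo_sorted (text : String) :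
    ∀ (cs : List Char) (n : Nat) (starts : List (Int × String)) (nl bd : Bool) (nd : PySem.Set Int) (depth : Int),
      (∀ e ∈ starts, e.1 ≤ (n : Int)) → starts.Pairwise (fun a b => a.1 < b.1) →
      (pvScanGo text cs n starts nl bd nd depth).Pairwise (fun a b => a.1 < b.1) := by
  intro cs
  induction cs with
  | nil => intro n starts nl bd nd depth _ hp; simpa [pvScanGo] using hp
  | cons c rest ih =>
    intro n starts nl bd nd depth hb hp
    simp only [pvScanGo]
    have hb' : ∀ e ∈ starts, e.1 ≤ ((n+1 : Nat) : Int) := fun e he => by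
      have := hb e he; push_cast; omega
    by_cases h1 : c = ';' ∨ c = '{' ∨ c = '}'
    · simp only [if_pos h1]; exact ih (n+1) starts _ _ _ _ hb' hp
    · simp only [if_neg h1]
      by_cases h2 : c = '\n' ∧ nl = true
      · simp only [if_pos h2]
        refine ih (n+1) _ _ _ _ _ (fun e he => ?_) ?_
        · rcases List.mem_append.mp he with h | h
          · have := hb e h; push_cast; omega
          · simp only [List.mem_singleton] at h
            subst h; push_cast; simp
        · rw [List.pairwise_append]
          refine ⟨hp, by simp, fun a ha b hbm => ?_⟩
          simp only [List.mem_singleton] at hbm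
          subst hbm
          have := hb a ha; simp; omega
      · simp only [if_neg h2]; exact ih (n+1) starts _ _ _ _ hb' hp

-- ===== VERDICT (by name: the statement is the Claim_ definition above) =====
theorem find_stmt_start_spec : Claim_equal_find_stmt_start := by
  intro text pos _ _
  unfold Spec_find_stmt_start find_stmt_start find_stmt_start_alt scan_stmt_starts
  rw [pvPick_eq_foldl pos _ _ (pvScanGo_sorted text _ 0 [] false false PySem.Set.empty 0 (by simp) (by simp))]
  have h := pvBGo_eq_foldl text pos text.toList 0 [] false false PySem.Set.empty 0 (0, "")
  simpa using h.symm
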